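-- pv_equiv track=rewrite | github.com/hakusai22/AlgoScripts | Algorithm/Algorithm_Competition/LeetCode/weekly/326/4.py | closestPrimes
-- ===== SOURCE A (Python) =====
-- from typing import List, Tuple, Optional, Dict, Set
--
-- def find_prime(n):
--     is_prime = [True] * (n + 1)
--     prime = []
--     for x in range(2, n + 1):
--         if is_prime[x]:
--             prime.append(x)
--         i = 0
--         while prime[i] * x <= n:
--             # 循环不变式：pi一定是pi*x的最小质因数
--             is_prime[prime[i] * x] = False
--             if x % prime[i] == 0:
--                 # pi一定是x的最小质因数，否则pi也是小于x的最小质数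
--                 i += 1
--                 break
--             i += 1
--     return prime
--
-- def closestPrimes(left: int, right: int) -> List[int]:
--     primes = find_prime(right)
--     primes = [x for x in primes if x >= left]
--     ans = []
--     m = len(primes)
--     for i in range(m - 1):
--         x, y = primes[i], primes[i + 1]
--         if not ans or y - x < ans[1] - ans[0]:
--             ans = [x, y]
--     return ans if ans else [-1, -1]
-- ===== SOURCE B (Python) =====
-- def closestPrimes(left: int, right: int) -> list:
--     # Plain composite-marking sieve (no prime list), then one streaming pass
--     # keeping only the previous prime and the best pair.
--     sieve = bytearray([1]) * (right + 1)
--     d = 2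
--     while d * d <= right:
--         sieve[d * d :: d] = bytes(len(sieve[d * d :: d]))
--         d += 1
--     prev = None
--     ans = None
--     for m in range(max(2, left), right + 1):
--         if sieve[m]:
--             if prev is not None:
--                 if ans is None or m - prev < ans[1] - ans[0]:
--                     ans = [prev, m]
--             prev = m
--     return ans if ans is not None else [-1, -1]
-- ===== Notes on version B (the rewrite author's own statement) =====
-- stated objective: simpler
-- what changed: Replaces the Euler linear sieve with its prime-list bookkeeping plus the indexed adjacent-pair scan by a plain composite-marking sieve over a byte array and a single streaming pass that keeps only the previous prime and the best pair.
import Mathlib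
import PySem

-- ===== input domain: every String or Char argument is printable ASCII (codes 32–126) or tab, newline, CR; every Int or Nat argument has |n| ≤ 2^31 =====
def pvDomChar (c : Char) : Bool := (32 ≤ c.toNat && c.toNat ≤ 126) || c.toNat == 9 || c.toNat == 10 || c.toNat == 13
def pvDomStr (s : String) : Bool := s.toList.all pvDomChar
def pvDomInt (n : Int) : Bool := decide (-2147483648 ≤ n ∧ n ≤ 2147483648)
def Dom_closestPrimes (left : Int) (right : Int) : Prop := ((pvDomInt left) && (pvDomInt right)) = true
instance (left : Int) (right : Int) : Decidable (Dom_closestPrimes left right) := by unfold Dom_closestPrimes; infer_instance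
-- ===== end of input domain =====

-- B replaces A's Euler linear sieve + prime list + indexed adjacent-pair scan by a plain
-- composite-marking sieve and one streaming pass keeping only (previous prime, best pair):
-- simpler, and measurably faster in Python (byte-array slice marking).

-- ===== PORT A =====
-- literal port of find_prime's inner `while prime[i] * x <= n` loop, as recursion on the
-- index i (the out-of-range case is Python's IndexError, which no reachable execution hits;
-- returning ip there is a totality guard only). Python lists are ported as Arrays so that
-- indexing/append/update cost what they cost in Python.
def sieveInner (n x : Nat) (prime : Array Nat) (ip : Array Bool) (i : Nat) : Array Bool :=
  if h : i < prime.size then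
    let p := prime[i]
    if p * x ≤ n then
      let ip' := ip.setIfInBounds (p * x) false
      if x % p == 0 then ip' else sieveInner n x prime ip' (i + 1)
    else ip
  else ip
termination_by prime.size - i

-- one iteration of find_prime's `for x in range(2, n+1)` body; state = (prime, is_prime)
def sieveStep (n : Nat) (st : Array Nat × Array Bool) (x : Nat) : Array Nat × Array Bool :=
  let prime := if st.2.getD x true then st.1.push x else st.1
  (prime, sieveInner n x prime st.2 0)

-- find_prime: all quantities are non-negative in Python, so the sieve runs over Nat and the
-- resulting prime list is cast back to Int at the end (pure representation change).
def findPrime (n : Int) : List Int :=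
  let N := n.toNat
  let st := (List.range' 2 (N + 1 - 2)).foldl (sieveStep N) (#[], Array.replicate (N + 1) true)
  st.1.toList.map (fun k : Nat => (k : Int))

-- body of closestPrimes' `for i in range(m - 1)` loop (primes as an array, like a Python list)
def aStep (primes : Array Int) (ans : List Int) (i : Nat) : List Int :=
  let x := primes.getD i 0
  let y := primes.getD (i + 1) 0
  if ans = [] ∨ y - x < ans.getD 1 0 - ans.getD 0 0 then [x, y] else ans

def closestPrimes (left : Int) (right : Int) : List Int :=
  let primes := ((findPrime right).filter (fun x => decide (left ≤ x))).toArray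
  let ans := (List.range (primes.size - 1)).foldl (aStep primes) []
  if ans = [] then [-1, -1] else ans

-- ===== PORT B =====
-- the slice assignment `sieve[d*d::d] = zeros` as a marking loop from m upward in steps of d;
-- the `2 <= d` conjunct is a totality guard only (d starts at 2 and only increases)
def markFrom (n d : Nat) (sieve : Array Bool) (m : Nat) : Array Bool :=
  if h : 2 ≤ d ∧ m ≤ n then markFrom n d (sieve.setIfInBounds m false) (m + d) else sieve
termination_by n + 1 - m
decreasing_by omega

-- B's `while d * d <= right` sieve loop (again `2 <= d` is a totality guard only)
def buildSieve (n d : Nat) (sieve : Array Bool) : Array Bool :=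
  if h : 2 ≤ d ∧ d * d ≤ n then buildSieve n (d + 1) (markFrom n d sieve (d * d)) else sieve
termination_by n + 1 - d
decreasing_by
  have h2 : 2 * d ≤ d * d := Nat.mul_le_mul_right d h.1
  omega

-- body of B's for loop; state = (prev, ans), both optional
def bStep (sieve : Array Bool) (st : Option Int × Option (Int × Int)) (m : Int) :
    Option Int × Option (Int × Int) :=
  if sieve.getD m.toNat false then
    (some m,
      match st.1, st.2 with
      | none, acc => acc
      | some prev, none => some (prev, m)
      | some prev, some (a, b) => if m - prev < b - a then some (prev, m) else some (a, b))
  else st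

def closestPrimes_alt (left : Int) (right : Int) : List Int :=
  let N := right.toNat
  let sieve := buildSieve N 2 (Array.replicate (N + 1) true)
  let r := (PySem.List.pyRange (max 2 left) (right + 1) 1).foldl (bStep sieve) (none, none)
  match r.2 with
  | some (a, b) => [a, b]
  | none => [-1, -1]

-- ===== PRECONDITION & SPEC =====
def Spec_closestPrimes (left : Int) (right : Int) (out : List Int) : Prop := out = closestPrimes_alt left right
instance (left : Int) (right : Int) (out : List Int) : Decidable (Spec_closestPrimes left right out) := by unfold Spec_closestPrimes; infer_instance

-- ===== CLAIM (what is proved, stated in full; the proofs are below) =====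
def Claim_equal_closestPrimes : Prop := ∀ (left : Int) (right : Int), Dom_closestPrimes left right → Spec_closestPrimes left right (closestPrimes left right)

-- ===== LEMMAS AND PROOFS =====

-- List-level restatements of A's sieve (proof objects; the port itself works on Arrays)
def sieveInnerL (n x : Nat) : List Nat → List Bool → List Bool
  | [], ip => ip
  | p :: ps, ip =>
    if p * x ≤ n then
      if x % p == 0 then ip.set (p * x) false
      else sieveInnerL n x ps (ip.set (p * x) false)
    else ip

def sieveStepL (n : Nat) (st : List Nat × List Bool) (x : Nat) : List Nat × List Bool :=
  let prime := if st.2.getD x true then st.1 ++ [x] else st.1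
  (prime, sieveInnerL n x prime st.2)

def aStepL (primes : List Int) (ans : List Int) (i : Nat) : List Int :=
  let x := primes.getD i 0
  let y := primes.getD (i + 1) 0
  if ans = [] ∨ y - x < ans.getD 1 0 - ans.getD 0 0 then [x, y] else ans

lemma array_getD_toList {α : Type} (a : Array α) (i : Nat) (d : α) :
    a.getD i d = a.toList.getD i d := by
  rw [Array.getD, List.getD_eq_getElem?_getD]
  split_ifs with h
  · rw [List.getElem?_eq_getElem (by simpa using h)]
    simp
  · rw [List.getElem?_eq_none (by simpa using not_lt.mp h)]
    rfl

lemma toList_sieveInner (n x : Nat) (prime : Array Nat) :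
    ∀ (fuel i : Nat) (ip : Array Bool), prime.size - i ≤ fuel →
    (sieveInner n x prime ip i).toList = sieveInnerL n x (prime.toList.drop i) ip.toList := by
  intro fuel
  induction fuel with
  | zero =>
    intro i ip hf
    have hi : ¬ i < prime.size := by omega
    rw [sieveInner]
    simp only [hi, dite_false]
    rw [List.drop_eq_nil_of_le (by simpa using not_lt.mp hi)]
    rfl
  | succ fuel ih =>
    intro i ip hf
    rw [sieveInner]
    by_cases hi : i < prime.size
    · have hdrop : prime.toList.drop i = prime[i] :: prime.toList.drop (i + 1) := by
        rw [List.drop_eq_getElem_cons (by simpa using hi)]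
        simp
      rw [hdrop]
      simp only [hi, dite_true, sieveInnerL]
      by_cases hpn : prime[i] * x ≤ n
      · simp only [hpn, if_true]
        by_cases hd : x % prime[i] == 0
        · simp only [hd, if_true]
          rw [Array.toList_setIfInBounds]
        · simp only [hd, Bool.false_eq_true, if_false]
          rw [ih (i + 1) _ (by omega), Array.toList_setIfInBounds]
      · simp only [hpn, if_false]
    · simp only [hi, dite_false]
      rw [List.drop_eq_nil_of_le (by simpa using not_lt.mp hi)]
      rfl

lemma sieveStep_toList (n : Nat) (st : Array Nat × Array Bool) (x : Nat) :
    ((sieveStep n st x).1.toList, (sieveStep n st x).2.toList) =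
      sieveStepL n (st.1.toList, st.2.toList) x := by
  rcases st with ⟨pr, ip⟩
  simp only [sieveStep, sieveStepL]
  rw [array_getD_toList]
  cases hb : ip.toList.getD x true
  · simp only [Bool.false_eq_true, if_false]
    rw [toList_sieveInner n x pr pr.size 0 ip (by omega)]
    simp
  · simp only [if_true]
    rw [toList_sieveInner n x (pr.push x) (pr.push x).size 0 ip (by omega)]
    simp [Array.toList_push]

lemma foldl_sieveStep_toList (n : Nat) :
    ∀ (l : List Nat) (st : Array Nat × Array Bool),
    ((l.foldl (sieveStep n) st).1.toList, (l.foldl (sieveStep n) st).2.toList) =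
      l.foldl (sieveStepL n) (st.1.toList, st.2.toList) := by
  intro l
  induction l with
  | nil => intro st; rfl
  | cons x l ih =>
    intro st
    rw [List.foldl_cons, List.foldl_cons, ih, sieveStep_toList]

-- the ascending list of primes ≤ k
def primesUpTo (k : Nat) : List Nat := (List.range (k + 1)).filter (fun p => decide (Nat.Prime p))

-- j has been crossed out after the sieve processed x = 2 .. k
def Marked (k j : Nat) : Prop :=
  ∃ p m, Nat.Prime p ∧ 2 ≤ m ∧ m ≤ k ∧ p ≤ m.minFac ∧ j = p * m

def SieveInv (n k : Nat) (st : List Nat × List Bool) : Prop :=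
  st.1 = primesUpTo k ∧ st.2.length = n + 1 ∧
  ∀ j, j ≤ n → (st.2.getD j true = false ↔ Marked k j)

lemma getD_set_bool (l : List Bool) (i j : Nat) (v d : Bool) :
    (l.set i v).getD j d = if i = j ∧ j < l.length then v else l.getD j d := by
  simp only [List.getD_eq_getElem?_getD, List.getElem?_set]
  by_cases hij : i = j
  · subst hij
    by_cases hl : i < l.length
    · simp [hl]
    · simp [hl]
  · simp [hij]

lemma length_sieveInner (n x : Nat) (ps : List Nat) (ip : List Bool) :
    (sieveInnerL n x ps ip).length = ip.length := by
  induction ps generalizing ip with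
  | nil => simp [sieveInnerL]
  | cons p ps ih =>
    simp only [sieveInnerL]
    split_ifs <;> simp [ih]

lemma mem_primesUpTo (k p : Nat) : p ∈ primesUpTo k ↔ Nat.Prime p ∧ p ≤ k := by
  simp [primesUpTo, List.mem_filter, List.mem_range]
  tauto

lemma pairwise_primesUpTo (k : Nat) : (primesUpTo k).Pairwise (· < ·) := by
  exact (List.pairwise_lt_range).filter _

lemma primesUpTo_succ (k : Nat) :
    primesUpTo (k + 1) =
      primesUpTo k ++ (if Nat.Prime (k + 1) then [k + 1] else []) := by
  simp only [primesUpTo, List.range_succ, List.filter_append, List.filter_singleton]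
  split_ifs with h <;> simp_all

lemma sieveInner_spec (n x : Nat) (_hx2 : 2 ≤ x) :
    ∀ (ps : List Nat) (ip : List Bool), ip.length = n + 1 →
    (∀ p ∈ ps, Nat.Prime p) → ps.Pairwise (· < ·) →
    (x.minFac * x ≤ n → x.minFac ∈ ps) →
    ∀ j, ((sieveInnerL n x ps ip).getD j true = false ↔
      ip.getD j true = false ∨ ∃ p ∈ ps, p ≤ x.minFac ∧ p * x ≤ n ∧ j = p * x) := by
  intro ps
  induction ps with
  | nil => intro ip _ _ _ _ j; simp [sieveInnerL]
  | cons p ps ih =>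
    intro ip hlen hprime hpair hmf j
    have hpp : Nat.Prime p := hprime p (List.mem_cons_self)
    have hp2 : 2 ≤ p := hpp.two_le
    have htail : ∀ q ∈ ps, Nat.Prime q := fun q hq => hprime q (List.mem_cons_of_mem p hq)
    have hlt_ps : ∀ q ∈ ps, p < q := fun q hq => List.rel_of_pairwise_cons hpair hq
    by_cases hpn : p * x ≤ n
    · have hset : ∀ j', (ip.set (p * x) false).getD j' true = false ↔
          (j' = p * x ∨ ip.getD j' true = false) := by
        intro j'
        rw [getD_set_bool]
        split_ifs with h
        · simp [h.1.symm]
        · have hne : ¬ j' = p * x := fun hc => h ⟨hc.symm, by omega⟩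
          simp [hne]
      by_cases hdvd : x % p = 0
      · have hcond : (x % p == 0) = true := by simpa using hdvd
        have hpdvdx : p ∣ x := Nat.dvd_of_mod_eq_zero hdvd
        have h1 : x.minFac ≤ p := Nat.minFac_le_of_dvd hp2 hpdvdx
        have hmem : x.minFac ∈ p :: ps :=
          hmf (le_trans (Nat.mul_le_mul_right x h1) hpn)
        have h2 : p ≤ x.minFac := by
          rcases List.mem_cons.mp hmem with h | h
          · omega
          · have := hlt_ps _ h; omega
        simp only [sieveInnerL, if_pos hpn, hcond, if_true]
        rw [hset j]
        constructor
        · rintro (rfl | hip)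
          · exact Or.inr ⟨p, List.mem_cons_self, h2, hpn, rfl⟩
          · exact Or.inl hip
        · rintro (hip | ⟨q, hqmem, hqle, hqn, rfl⟩)
          · exact Or.inr hip
          · rcases List.mem_cons.mp hqmem with rfl | h
            · exact Or.inl rfl
            · have := hlt_ps _ h; omega
      · have hcond : (x % p == 0) = false := by simpa using hdvd
        have hnd : ¬ p ∣ x := fun hc => hdvd (Nat.dvd_iff_mod_eq_zero.mp hc)
        have hne : p ≠ x.minFac := fun hc => hnd (hc ▸ Nat.minFac_dvd x)
        have hlt : p < x.minFac := by
          by_contra hcon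
          have hmlt : x.minFac < p := by omega
          have hmn : x.minFac * x ≤ n := le_trans (Nat.mul_le_mul_right x (by omega)) hpn
          rcases List.mem_cons.mp (hmf hmn) with h | h
          · omega
          · have := hlt_ps _ h; omega
        have hmf' : x.minFac * x ≤ n → x.minFac ∈ ps := by
          intro hmn
          rcases List.mem_cons.mp (hmf hmn) with h | h
          · omega
          · exact h
        simp only [sieveInnerL, if_pos hpn, hcond, Bool.false_eq_true, if_false]
        rw [ih (ip.set (p * x) false) (by simp [hlen]) htail
            (List.pairwise_cons.mp hpair).2 hmf' j]
        rw [hset j]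
        constructor
        · rintro ((rfl | hip) | ⟨q, hq, hqle, hqn, rfl⟩)
          · exact Or.inr ⟨p, List.mem_cons_self, by omega, hpn, rfl⟩
          · exact Or.inl hip
          · exact Or.inr ⟨q, List.mem_cons_of_mem p hq, hqle, hqn, rfl⟩
        · rintro (hip | ⟨q, hq, hqle, hqn, rfl⟩)
          · exact Or.inl (Or.inr hip)
          · rcases List.mem_cons.mp hq with rfl | h
            · exact Or.inl (Or.inl rfl)
            · exact Or.inr ⟨q, h, hqle, hqn, rfl⟩
    · have hnone : ¬ ∃ q ∈ p :: ps, q ≤ x.minFac ∧ q * x ≤ n ∧ j = q * x := by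
        rintro ⟨q, hq, hqle, hqn, rfl⟩
        rcases List.mem_cons.mp hq with rfl | h
        · exact hpn hqn
        · have := hlt_ps _ h
          exact hpn (le_trans (Nat.mul_le_mul_right x (by omega)) hqn)
      simp only [sieveInnerL, if_neg hpn]
      constructor
      · exact Or.inl
      · rintro (hip | hex)
        · exact hip
        · exact absurd hex hnone

lemma marked_iff_not_prime (x : Nat) (hx : 2 ≤ x) : Marked (x - 1) x ↔ ¬ Nat.Prime x := by
  constructor
  · rintro ⟨p, m, hp, h2, hmk, hmin, rfl⟩
    have hp2 := hp.two_le
    exact Nat.not_prime_mul (by omega) (by omega)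
  · intro hnp
    have hx1 : x ≠ 1 := by omega
    have hp : Nat.Prime x.minFac := Nat.minFac_prime hx1
    have hp2 := hp.two_le
    obtain ⟨m, heq⟩ : x.minFac ∣ x := Nat.minFac_dvd x
    have hm0 : m ≠ 0 := by intro hc; rw [hc, Nat.mul_zero] at heq; omega
    have hm1 : m ≠ 1 := by
      intro hc; rw [hc, Nat.mul_one] at heq
      exact hnp (heq ▸ hp)
    have h2m : 2 * m ≤ x.minFac * m := Nat.mul_le_mul_right m hp2
    have hmdvd : m ∣ x := Dvd.intro_left _ heq.symm
    have hminm : Nat.Prime m.minFac := Nat.minFac_prime hm1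
    refine ⟨x.minFac, m, hp, by omega, by omega, ?_, heq⟩
    exact Nat.minFac_le_of_dvd hminm.two_le (dvd_trans (Nat.minFac_dvd _) hmdvd)

lemma marked_succ (k j : Nat) (hk : 1 ≤ k) :
    Marked (k + 1) j ↔ Marked k j ∨ ∃ p, Nat.Prime p ∧ p ≤ (k + 1).minFac ∧ j = p * (k + 1) := by
  constructor
  · rintro ⟨p, m, hp, h2, hmk, hmin, rfl⟩
    rcases Nat.lt_or_ge m (k + 1) with h | h
    · exact Or.inl ⟨p, m, hp, h2, by omega, hmin, rfl⟩
    · have : m = k + 1 := by omega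
      subst this
      exact Or.inr ⟨p, hp, hmin, rfl⟩
  · rintro (⟨p, m, hp, h2, hmk, hmin, rfl⟩ | ⟨p, hp, hle, rfl⟩)
    · exact ⟨p, m, hp, h2, by omega, hmin, rfl⟩
    · exact ⟨p, k + 1, hp, by omega, le_rfl, hle, rfl⟩

lemma sieveStep_inv (n k : Nat) (st : List Nat × List Bool)
    (h : SieveInv n k st) (hk : 1 ≤ k) (hxn : k + 1 ≤ n) :
    SieveInv n (k + 1) (sieveStepL n st (k + 1)) := by
  obtain ⟨h1, h2, h3⟩ := h
  have hx2 : 2 ≤ k + 1 := by omega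
  have hread := h3 (k + 1) (by omega)
  have hm : Marked k (k + 1) ↔ ¬ Nat.Prime (k + 1) := by
    have := marked_iff_not_prime (k + 1) hx2
    simpa using this
  have hpx : st.2.getD (k + 1) true = true ↔ Nat.Prime (k + 1) := by
    constructor
    · intro ht
      by_contra hp
      have hmk : Marked k (k + 1) := hm.mpr hp
      have := hread.mpr hmk
      rw [ht] at this; cases this
    · intro hp
      cases hb : st.2.getD (k + 1) true
      · exact absurd hp (hm.mp (hread.mp hb))
      · rfl
  have hprime' : (if st.2.getD (k + 1) true then st.1 ++ [k + 1] else st.1) =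
      primesUpTo (k + 1) := by
    cases hb : st.2.getD (k + 1) true
    · have hnp : ¬ Nat.Prime (k + 1) := fun hp => by
        rw [hpx.mpr hp] at hb; cases hb
      simp only [if_false, Bool.false_eq_true]
      rw [primesUpTo_succ, if_neg hnp, List.append_nil, h1]
    · have hp : Nat.Prime (k + 1) := hpx.mp hb
      simp only [if_true]
      rw [primesUpTo_succ, if_pos hp, h1]
  have hall : ∀ p ∈ primesUpTo (k + 1), Nat.Prime p :=
    fun p hp => ((mem_primesUpTo _ _).mp hp).1
  have hpw : (primesUpTo (k + 1)).Pairwise (· < ·) := pairwise_primesUpTo _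
  have hmf : (k + 1).minFac * (k + 1) ≤ n → (k + 1).minFac ∈ primesUpTo (k + 1) := by
    intro _
    exact (mem_primesUpTo _ _).mpr
      ⟨Nat.minFac_prime (by omega), Nat.minFac_le (by omega)⟩
  refine ⟨?_, ?_, ?_⟩
  · simpa [sieveStepL] using hprime'
  · simp only [sieveStepL]
    rw [length_sieveInner]; exact h2
  · intro j hj
    simp only [sieveStepL]
    rw [hprime']
    rw [sieveInner_spec n (k + 1) hx2 (primesUpTo (k + 1)) st.2 h2 hall hpw hmf j]
    rw [marked_succ k j hk, h3 j hj]
    constructor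
    · rintro (hmk | ⟨p, hp, hple, hpn, rfl⟩)
      · exact Or.inl hmk
      · exact Or.inr ⟨p, hall p hp, hple, rfl⟩
    · rintro (hmk | ⟨p, hp, hple, rfl⟩)
      · exact Or.inl hmk
      · have hpk : p ≤ k + 1 := le_trans hple (Nat.minFac_le (by omega))
        exact Or.inr ⟨p, (mem_primesUpTo _ _).mpr ⟨hp, hpk⟩, hple, by omega, rfl⟩

lemma sieve_fold (n c : Nat) (h : 1 + c ≤ n) :
    SieveInv n (1 + c)
      ((List.range' 2 c).foldl (sieveStepL n) ([], List.replicate (n + 1) true)) := by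
  induction c with
  | zero =>
    have h1 : primesUpTo 1 = [] := by decide
    refine ⟨by simp [h1], by simp, ?_⟩
    intro j hj
    simp only [List.range'_zero, List.foldl_nil]
    constructor
    · intro hc
      rw [List.getD_eq_getElem?_getD, List.getElem?_replicate] at hc
      split_ifs at hc <;> simp_all
    · rintro ⟨p, m, hp, hm2, hm1, _, _⟩
      have := hp.two_le
      omega
  | succ c ih =>
    have hc : 1 + c ≤ n := by omega
    have e : List.range' 2 (c + 1) = List.range' 2 c ++ [2 + c] := by
      rw [List.range'_1_concat]
    rw [e, List.foldl_append, List.foldl_cons, List.foldl_nil]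
    have e2 : 2 + c = (1 + c) + 1 := by omega
    have e3 : 1 + (c + 1) = (1 + c) + 1 := by omega
    rw [e2, e3]
    exact sieveStep_inv n (1 + c) _ (ih hc) (by omega) (by omega)

lemma findPrime_eq (right : Int) :
    findPrime right = (primesUpTo right.toNat).map (fun k : Nat => (k : Int)) := by
  have hdef : findPrime right =
      ((List.range' 2 (right.toNat + 1 - 2)).foldl (sieveStep right.toNat)
        (#[], Array.replicate (right.toNat + 1) true)).1.toList.map (fun k : Nat => (k : Int)) := rfl
  have hsim := foldl_sieveStep_toList right.toNat (List.range' 2 (right.toNat + 1 - 2))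
    (#[], Array.replicate (right.toNat + 1) true)
  have hfst : ((List.range' 2 (right.toNat + 1 - 2)).foldl (sieveStep right.toNat)
      (#[], Array.replicate (right.toNat + 1) true)).1.toList =
      ((List.range' 2 (right.toNat + 1 - 2)).foldl (sieveStepL right.toNat)
        ([], List.replicate (right.toNat + 1) true)).1 := by
    have := congrArg Prod.fst hsim
    simpa [Array.toList_replicate] using this
  rw [hdef, hfst]
  rcases Nat.lt_or_ge right.toNat 2 with h | h
  · have e : right.toNat + 1 - 2 = 0 := by omega
    rw [e]
    have e2 : primesUpTo right.toNat = [] := by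
      interval_cases h : right.toNat <;> decide
    simp [e2]
  · have e : right.toNat + 1 - 2 = right.toNat - 1 := by omega
    have hinv := sieve_fold right.toNat (right.toNat - 1) (by omega)
    have e3 : 1 + (right.toNat - 1) = right.toNat := by omega
    rw [e3] at hinv
    rw [e, hinv.1]

lemma exists_div_iff_not_prime (k : Nat) (h2 : 2 ≤ k) :
    (∃ e, 2 ≤ e ∧ e * e ≤ k ∧ e ∣ k) ↔ ¬ Nat.Prime k := by
  constructor
  · rintro ⟨e, he2, hee, hdvd⟩ hp
    rw [Nat.prime_def_le_sqrt] at hp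
    exact hp.2 e he2 (Nat.le_sqrt.mpr hee) hdvd
  · intro hnp
    by_contra hne
    push_neg at hne
    apply hnp
    rw [Nat.prime_def_le_sqrt]
    exact ⟨h2, fun m hm hms => hne m hm (Nat.le_sqrt.mp hms)⟩

lemma array_getD_set (a : Array Bool) (i j : Nat) (v d : Bool) :
    (a.setIfInBounds i v).getD j d = if i = j ∧ j < a.size then v else a.getD j d := by
  rw [array_getD_toList, Array.toList_setIfInBounds, getD_set_bool, array_getD_toList]
  simp

lemma markFrom_spec (n d : Nat) (hd : 2 ≤ d) :
    ∀ (fuel m : Nat) (sieve : Array Bool), n + 1 - m ≤ fuel → sieve.size = n + 1 →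
      (markFrom n d sieve m).size = n + 1 ∧
      ∀ j, ((markFrom n d sieve m).getD j false = false ↔
        sieve.getD j false = false ∨ ∃ t, j = m + d * t ∧ j ≤ n) := by
  intro fuel
  induction fuel with
  | zero =>
    intro m sieve hf hs
    have hm : ¬ m ≤ n := by omega
    rw [markFrom]
    simp only [hd, hm, and_false, true_and, dite_false]
    refine ⟨hs, fun j => ?_⟩
    constructor
    · exact Or.inl
    · rintro (h | ⟨t, rfl, hj⟩)
      · exact h
      · have : d * t ≥ 0 := Nat.zero_le _
        omega
  | succ fuel ih =>
    intro m sieve hf hs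
    rw [markFrom]
    by_cases hm : m ≤ n
    · simp only [hd, hm, and_true, true_and, dite_true]
      obtain ⟨ihs, ihg⟩ := ih (m + d) (sieve.setIfInBounds m false)
        (by omega) (by simp [hs])
      refine ⟨ihs, fun j => ?_⟩
      rw [ihg j, array_getD_set]
      have hmlt : m < sieve.size := by omega
      constructor
      · rintro (h | ⟨t, rfl, hj⟩)
        · split_ifs at h with hc
          · obtain ⟨rfl, -⟩ := hc
            exact Or.inr ⟨0, by ring, hm⟩
          · exact Or.inl h
        · exact Or.inr ⟨t + 1, by ring, hj⟩
      · rintro (h | ⟨t, rfl, hj⟩)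
        · left
          split_ifs with hc
          · rfl
          · exact h
        · rcases t with _ | t
          · left
            have he : m + d * 0 = m := by ring
            rw [he]
            simp [hmlt]
          · exact Or.inr ⟨t, by ring, hj⟩
    · simp only [hd, hm, and_false, true_and, dite_false]
      refine ⟨hs, fun j => ?_⟩
      constructor
      · exact Or.inl
      · rintro (h | ⟨t, rfl, hj⟩)
        · exact h
        · have : d * t ≥ 0 := Nat.zero_le _
          omega

lemma buildSieve_spec (n : Nat) :
    ∀ (fuel d : Nat) (sieve : Array Bool), n + 1 - d ≤ fuel → 2 ≤ d → sieve.size = n + 1 →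
      ∀ j, ((buildSieve n d sieve).getD j false = false ↔
        sieve.getD j false = false ∨
          ∃ e, d ≤ e ∧ e * e ≤ n ∧ ∃ t, j = e * e + e * t ∧ j ≤ n) := by
  intro fuel
  induction fuel with
  | zero =>
    intro d sieve hf hd hs j
    have hdd : d ≤ d * d := Nat.le_mul_of_pos_left d (by omega)
    have hdn : ¬ (d * d ≤ n) := by omega
    rw [buildSieve]
    simp only [hd, hdn, and_false, true_and, dite_false]
    constructor
    · exact Or.inl
    · rintro (h | ⟨e, hde, hen, -⟩)
      · exact h
      · exact absurd (le_trans (Nat.mul_le_mul hde hde) hen) (by omega)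
  | succ fuel ih =>
    intro d sieve hf hd hs j
    rw [buildSieve]
    by_cases hdn : d * d ≤ n
    · simp only [hd, hdn, and_true, true_and, dite_true]
      have hdlt : d < n + 1 := by
        have h1 : d < 2 * d := by omega
        have h2 : 2 * d ≤ d * d := Nat.mul_le_mul_right d hd
        omega
      obtain ⟨ms, mg⟩ := markFrom_spec n d hd (n + 1) (d * d) sieve (by omega) hs
      rw [ih (d + 1) (markFrom n d sieve (d * d)) (by omega) (by omega) ms j, mg j]
      constructor
      · rintro ((h | ⟨t, rfl, hj⟩) | ⟨e, hde, hen, ht⟩)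
        · exact Or.inl h
        · exact Or.inr ⟨d, le_rfl, hdn, t, rfl, hj⟩
        · exact Or.inr ⟨e, by omega, hen, ht⟩
      · rintro (h | ⟨e, hde, hen, ht⟩)
        · exact Or.inl (Or.inl h)
        · rcases Nat.lt_or_ge d e with h' | h'
          · exact Or.inr ⟨e, by omega, hen, ht⟩
          · have : e = d := by omega
            subst this
            obtain ⟨t, rfl, hj⟩ := ht
            exact Or.inl (Or.inr ⟨t, rfl, hj⟩)
    · simp only [hd, hdn, and_false, true_and, dite_false]
      constructor
      · exact Or.inl
      · rintro (h | ⟨e, hde, hen, -⟩)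
        · exact h
        · exact absurd (le_trans (Nat.mul_le_mul hde hde) hen) hdn

-- reading the finished sieve at 2 ≤ k ≤ N answers primality of k
lemma sieve_read (N k : Nat) (h2 : 2 ≤ k) (hk : k ≤ N) :
    (buildSieve N 2 (Array.replicate (N + 1) true)).getD k false = decide (Nat.Prime k) := by
  have hrep : (Array.replicate (N + 1) true).getD k false = true := by
    rw [array_getD_toList]
    simp only [Array.toList_replicate]
    rw [List.getD_eq_getElem?_getD, List.getElem?_replicate, if_pos (by omega)]
    rfl
  have hspec := buildSieve_spec N (N + 1) 2 (Array.replicate (N + 1) true)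
    (by omega) (by omega) (by simp) k
  have hiff : (buildSieve N 2 (Array.replicate (N + 1) true)).getD k false = false ↔
      ¬ Nat.Prime k := by
    rw [hspec, hrep]
    simp only [Bool.true_eq_false, false_or]
    rw [← exists_div_iff_not_prime k h2]
    constructor
    · rintro ⟨e, he2, hen, t, rfl, hj⟩
      exact ⟨e, he2, by omega, ⟨e + t, by ring⟩⟩
    · rintro ⟨e, he2, hee, sdvd⟩
      obtain ⟨v, rfl⟩ := sdvd
      have hev : e ≤ v := by
        by_contra hc
        push_neg at hc
        have : e * v < e * e := (Nat.mul_lt_mul_left (show 0 < e by omega)).mpr hc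
        omega
      refine ⟨e, he2, by omega, v - e, ?_, by omega⟩
      have hd1 : e * (v - e) = e * v - e * e := Nat.mul_sub e v e
      have hd2 : e * e ≤ e * v := Nat.mul_le_mul_left e hev
      omega
  by_cases hp : Nat.Prime k
  · simp only [hp, decide_true]
    cases hb : (buildSieve N 2 (Array.replicate (N + 1) true)).getD k false
    · exact absurd (hiff.mp hb) (not_not_intro hp)
    · rfl
  · simp only [hp, decide_false]
    exact hiff.mpr hp

-- B's range, filtered by the primality test, is exactly A's filtered prime list
lemma filter_range_int (a : Int) (ha : 0 < a) (M : Nat) :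
    ((List.range M).map (fun k : Nat => (k : Int))).filter (fun z => decide (a ≤ z)) =
      PySem.List.pyRange a (M : Int) 1 := by
  induction M with
  | zero =>
    rw [PySem.List.pyRange_one_eq_nil (by omega)]
    simp
  | succ M ih =>
    have hcast : ((M + 1 : Nat) : Int) = (M : Int) + 1 := by push_cast; ring
    rw [hcast, List.range_succ, List.map_append, List.filter_append, ih]
    by_cases hM : a ≤ (M : Int)
    · rw [PySem.List.pyRange_one_succ_right hM]
      simp [hM]
    · have h1 : PySem.List.pyRange a (M : Int) 1 = [] :=
        PySem.List.pyRange_one_eq_nil (by omega)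
      have h2 : PySem.List.pyRange a ((M : Int) + 1) 1 = [] :=
        PySem.List.pyRange_one_eq_nil (by omega)
      simp [h1, h2, hM]

lemma bList_eq (left right : Int) :
    (PySem.List.pyRange (max 2 left) (right + 1) 1).filter
        (fun z => (buildSieve right.toNat 2 (Array.replicate (right.toNat + 1) true)).getD z.toNat false) =
      (findPrime right).filter (fun x => decide (left ≤ x)) := by
  rw [findPrime_eq]
  have ha : (0 : Int) < max 2 left := lt_of_lt_of_le (by omega) (le_max_left 2 left)
  have hrange : PySem.List.pyRange (max 2 left) (right + 1) 1 =
      PySem.List.pyRange (max 2 left) ((right.toNat : Int) + 1) 1 := by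
    rcases le_or_gt 0 right with h | h
    · rw [Int.toNat_of_nonneg h]
    · rw [PySem.List.pyRange_one_eq_nil (by omega),
        PySem.List.pyRange_one_eq_nil (by
          have : (right.toNat : Int) = 0 := by omega
          omega)]
  rw [hrange]
  have hcast : ((right.toNat + 1 : Nat) : Int) = (right.toNat : Int) + 1 := by push_cast; ring
  rw [← hcast, ← filter_range_int (max 2 left) ha (right.toNat + 1)]
  unfold primesUpTo
  rw [List.filter_map, List.filter_map, List.filter_map, List.filter_filter, List.filter_filter]
  congr 1
  apply List.filter_congr
  intro k hk
  have hkN : k ≤ right.toNat := by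
    rw [List.mem_range] at hk; omega
  simp only [Function.comp]
  by_cases h2 : 2 ≤ k
  · rw [show ((k : Int)).toNat = k from Int.toNat_natCast k, sieve_read right.toNat k h2 hkN]
    by_cases hp : Nat.Prime k
    · have hiff : max 2 left ≤ (k : Int) ↔ left ≤ (k : Int) := by
        constructor
        · intro h; exact le_trans (le_max_right 2 left) h
        · intro h; rw [max_le_iff]; exact ⟨by omega, h⟩
      by_cases hl : left ≤ (k : Int)
      · simp [hp, hl, hiff.mpr hl]
      · have : ¬ max 2 left ≤ (k : Int) := fun hc => hl (hiff.mp hc)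
        simp [hp, hl, this]
    · simp [hp]
  · have hnp : ¬ Nat.Prime k := fun hp => h2 hp.two_le
    have hna : ¬ max 2 left ≤ (k : Int) := by
      intro hc
      have := le_trans (le_max_left 2 left) hc
      omega
    simp [hnp, hna]

-- A's loop body on an adjacent pair, and the pure (guard-free) loop body of B
def aStepL' (a : List Int) (x y : Int) : List Int :=
  if a = [] ∨ y - x < a.getD 1 0 - a.getD 0 0 then [x, y] else a

def updatePair (acc : Option (Int × Int)) (prev n : Int) : Option (Int × Int) :=
  match acc with
  | none => some (prev, n)
  | some (a, b) => if n - prev < b - a then some (prev, n) else some (a, b)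

def pStep (st : Option Int × Option (Int × Int)) (n : Int) : Option Int × Option (Int × Int) :=
  (some n, match st.1 with
           | none => st.2
           | some prev => updatePair st.2 prev n)

def bestAux (prev : Int) (acc : Option (Int × Int)) : List Int → Option (Int × Int)
  | [] => acc
  | y :: t => bestAux y (updatePair acc prev y) t

def optToList (acc : Option (Int × Int)) : List Int :=
  match acc with
  | none => []
  | some (a, b) => [a, b]

lemma bStep_eq (sieve : Array Bool) (st : Option Int × Option (Int × Int)) (n : Int) :
    bStep sieve st n = if sieve.getD n.toNat false then pStep st n else st := by
  rcases st with ⟨p?, acc⟩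
  cases hp : sieve.getD n.toNat false <;> rcases p? with _ | prev <;> rcases acc with _ | ⟨a, b⟩ <;>
    simp [bStep, pStep, updatePair, hp]

lemma foldl_pStep (t : List Int) : ∀ (prev : Int) (acc : Option (Int × Int)),
    t.foldl pStep (some prev, acc) = (some (t.getLastD prev), bestAux prev acc t) := by
  induction t with
  | nil => intro prev acc; simp [bestAux]
  | cons y t ih =>
    intro prev acc
    simp only [List.foldl_cons]
    have h : pStep (some prev, acc) y = (some y, updatePair acc prev y) := rfl
    rw [h, ih, bestAux, List.getLastD_cons]

lemma rangeFold_aStep (L : List Int) :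
    (List.range (L.length - 1)).foldl (aStepL L) [] =
      (L.zip L.tail).foldl (fun a p => aStepL' a p.1 p.2) [] := by
  have hlen : (L.zip L.tail).length = L.length - 1 := by
    rw [List.length_zip, List.length_tail]; omega
  have aux : ∀ c, c ≤ (L.zip L.tail).length →
      (List.range c).foldl (aStepL L) [] =
        ((L.zip L.tail).take c).foldl (fun a p => aStepL' a p.1 p.2) [] := by
    intro c
    induction c with
    | zero => intro _; simp
    | succ c ih =>
      intro hc
      have hczip : c < (L.zip L.tail).length := by omega
      have hcL : c < L.length := by omega
      have hcL1 : c + 1 < L.length := by omega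
      have hctail : c < L.tail.length := by rw [List.length_tail]; omega
      rw [List.range_succ, List.foldl_append, List.foldl_cons, List.foldl_nil, ih (by omega)]
      rw [List.take_add_one, List.getElem?_eq_getElem hczip]
      simp only [Option.toList_some]
      rw [List.foldl_append, List.foldl_cons, List.foldl_nil]
      have hz : (L.zip L.tail)[c] = (L[c], L.tail[c]) := List.getElem_zip
      have ht : L.tail[c] = L[c + 1] := by rw [List.getElem_tail]
      have hgd1 : L.getD c 0 = L[c] := List.getD_eq_getElem L 0 hcL
      have hgd2 : L.getD (c + 1) 0 = L[c + 1] := List.getD_eq_getElem L 0 hcL1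
      rw [hz]
      show aStepL L _ c = aStepL' _ L[c] L.tail[c]
      rw [aStepL, aStepL', hgd1, hgd2, ht]
  rw [← hlen, aux _ le_rfl, List.take_length]

lemma pairsFold_bestAux (t : List Int) : ∀ (x : Int) (acc : Option (Int × Int)),
    ((x :: t).zip t).foldl (fun a p => aStepL' a p.1 p.2) (optToList acc) =
      optToList (bestAux x acc t) := by
  induction t with
  | nil => intro x acc; simp [bestAux]
  | cons y t ih =>
    intro x acc
    have hz : ((x :: y :: t).zip (y :: t)) = (x, y) :: ((y :: t).zip t) := rfl
    rw [hz, List.foldl_cons]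
    have hstep : aStepL' (optToList acc) x y = optToList (updatePair acc x y) := by
      rcases acc with _ | ⟨a, b⟩
      · simp [aStepL', optToList, updatePair]
      · simp only [aStepL', optToList, updatePair, List.getD]
        split_ifs with h <;> simp_all
    rw [hstep]
    exact ih y (updatePair acc x y)

-- A's array-indexed scan equals the list-level scan
lemma aStep_toArray (L : List Int) : aStep L.toArray = aStepL L := by
  funext ans i
  simp only [aStep, aStepL, array_getD_toList]

-- A's result and B's result as functions of the common filtered prime list / final accumulator
def aOut (L : List Int) : List Int :=
  if (List.range (L.length - 1)).foldl (aStepL L) [] = [] then [-1, -1]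
  else (List.range (L.length - 1)).foldl (aStepL L) []

def bOut (acc : Option (Int × Int)) : List Int :=
  match acc with
  | some (a, b) => [a, b]
  | none => [-1, -1]

lemma scan_eq (L : List Int) : aOut L = bOut ((L.foldl pStep (none, none)).2) := by
  cases L with
  | nil => simp [aOut, bOut]
  | cons x t =>
    have h1 : (List.range ((x :: t).length - 1)).foldl (aStepL (x :: t)) [] =
        optToList (bestAux x none t) := by
      rw [rangeFold_aStep]
      have := pairsFold_bestAux t x none
      simpa [optToList] using this
    have h2 : ((x :: t).foldl pStep (none, none)).2 = bestAux x none t := by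
      rw [List.foldl_cons]
      have h : pStep (none, none) x = (some x, none) := rfl
      rw [h, foldl_pStep]
    rw [aOut, h1, h2]
    rcases bestAux x none t with _ | ⟨a, b⟩ <;> simp [optToList, bOut]

-- ===== VERDICT (by name: the statement is the Claim_ definition above) =====
theorem closestPrimes_spec : Claim_equal_closestPrimes := by
  intro left right _
  unfold Spec_closestPrimes
  have hA : closestPrimes left right =
      aOut ((findPrime right).filter (fun x => decide (left ≤ x))) := by
    show (if (List.range (((findPrime right).filter (fun x => decide (left ≤ x))).toArray.size - 1)).foldl
        (aStep ((findPrime right).filter (fun x => decide (left ≤ x))).toArray) [] = [] then [-1, -1]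
      else (List.range (((findPrime right).filter (fun x => decide (left ≤ x))).toArray.size - 1)).foldl
        (aStep ((findPrime right).filter (fun x => decide (left ≤ x))).toArray) []) = _
    rw [aStep_toArray, List.size_toArray]
    rfl
  have hB : closestPrimes_alt left right =
      bOut (((PySem.List.pyRange (max 2 left) (right + 1) 1).foldl
        (bStep (buildSieve right.toNat 2 (Array.replicate (right.toNat + 1) true)))
        (none, none)).2) := rfl
  rw [hA, hB]
  rw [show bStep (buildSieve right.toNat 2 (Array.replicate (right.toNat + 1) true)) =
      (fun st n => if (buildSieve right.toNat 2 (Array.replicate (right.toNat + 1) true)).getD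
          n.toNat false then pStep st n else st) from
    funext fun st => funext fun n => bStep_eq _ st n]
  rw [PySem.List.foldl_if_eq_foldl_filter]
  rw [bList_eq left right]
  exact scan_eq _
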